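-- pv_equiv track=rewrite | github.com/luascfl/scrape_websites | download_pdf_document_posts_linkedin/downloads/rename_pdfs.py | pick_default_index
-- ===== SOURCE A (Python) =====
-- def pick_default_index(candidates):
--     if not candidates:
--         return None
--     priority = {"metadata": 0, "pagina2": 1, "pagina1": 2, "arquivo": 3}
--     best_idx = 0
--     best_score = 99
--     for idx, (src, _) in enumerate(candidates):
--         score = priority.get(src, 50)
--         if score < best_score:
--             best_score = score
--             best_idx = idx
--     return best_idx
-- ===== SOURCE B (Python) =====
-- def pick_default_index(candidates):
--     if not candidates:
--         return None
--     for name in ("metadata", "pagina2", "pagina1", "arquivo"):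
--         for idx, (src, _) in enumerate(candidates):
--             if src == name:
--                 return idx
--     return 0
-- ===== Notes on version B (the rewrite author's own statement) =====
-- stated objective: alternative
-- what changed: Replaces the single min-score-tracking fold over the candidates with nested scans driven by the fixed priority list: for each source name in priority order, return the first candidate index with that source, falling back to 0.
import Mathlib
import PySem

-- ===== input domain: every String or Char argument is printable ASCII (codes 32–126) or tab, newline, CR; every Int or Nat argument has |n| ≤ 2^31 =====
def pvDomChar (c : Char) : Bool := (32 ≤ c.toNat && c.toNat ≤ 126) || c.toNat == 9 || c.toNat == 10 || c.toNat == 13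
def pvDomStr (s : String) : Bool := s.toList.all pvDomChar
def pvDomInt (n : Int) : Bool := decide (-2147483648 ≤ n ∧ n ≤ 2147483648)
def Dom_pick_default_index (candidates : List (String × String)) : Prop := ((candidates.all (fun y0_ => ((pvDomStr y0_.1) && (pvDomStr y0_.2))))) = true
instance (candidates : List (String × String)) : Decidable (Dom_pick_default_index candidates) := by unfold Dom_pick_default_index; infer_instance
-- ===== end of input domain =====

-- B scans the fixed priority list of source names and returns the first index matching each
-- name in turn (fallback 0), instead of A's single min-score-tracking fold; same cost class.

-- ===== PORT A =====
def pick_default_index (candidates : List (String × String)) : Option Int :=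
  if candidates = [] then none
  else
    let priority : PySem.Dict String Int :=
      PySem.Dict.ofList [("metadata", 0), ("pagina2", 1), ("pagina1", 2), ("arquivo", 3)]
    let r := (PySem.List.enumerate candidates 0).foldl
      (fun (st : Int × Int) p =>
        let score := priority.getD p.2.1 50
        if score < st.2 then (p.1, score) else st) (0, 99)
    some r.1

-- ===== PORT B =====
def findSrc (name : String) (i : Int) : List (String × String) → Option Int
  | [] => none
  | p :: r => if p.1 = name then some i else findSrc name (i + 1) r

def pickByPriority (c : List (String × String)) : List String → Int
  | [] => 0
  | n :: ns =>
    match findSrc n 0 c with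
    | some i => i
    | none => pickByPriority c ns

def pick_default_index_alt (candidates : List (String × String)) : Option Int :=
  if candidates = [] then none
  else some (pickByPriority candidates ["metadata", "pagina2", "pagina1", "arquivo"])

-- ===== PRECONDITION & SPEC =====
def Spec_pick_default_index (candidates : List (String × String)) (out : Option Int) : Prop := out = pick_default_index_alt candidates
instance (candidates : List (String × String)) (out : Option Int) : Decidable (Spec_pick_default_index candidates out) := by unfold Spec_pick_default_index; infer_instance

-- ===== CLAIM (what is proved, stated in full; the proofs are below) =====
def Claim_equal_pick_default_index : Prop := ∀ (candidates : List (String × String)), Dom_pick_default_index candidates → Spec_pick_default_index candidates (pick_default_index candidates)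

-- ===== LEMMAS AND PROOFS =====

/-- the score A's priority dict assigns to a source string -/
def score (s : String) : Int :=
  if s = "metadata" then 0 else if s = "pagina2" then 1
  else if s = "pagina1" then 2 else if s = "arquivo" then 3 else 50

/-- A's fold, written as structural recursion on the candidate list -/
def fA : List (String × String) → Int → Int × Int → Int × Int
  | [], _, st => st
  | p :: r, i, st => fA r (i + 1) (if score p.1 < st.2 then (i, score p.1) else st)

/-- minimum score in the list (99 on []) -/
def mval : List (String × String) → Int
  | [] => 99
  | p :: r => min (score p.1) (mval r)

/-- first index attaining the minimum score -/
def fmi : List (String × String) → Int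
  | [] => 0
  | p :: r => if score p.1 ≤ mval r then 0 else fmi r + 1

lemma priority_getD (s : String) :
    (PySem.Dict.ofList [("metadata", (0:Int)), ("pagina2", 1), ("pagina1", 2), ("arquivo", 3)]).getD s 50 = score s := by
  unfold score
  have h : PySem.Dict.ofList [("metadata", (0:Int)), ("pagina2", 1), ("pagina1", 2), ("arquivo", 3)] = PySem.Dict.mk [("metadata", (0:Int)), ("pagina2", 1), ("pagina1", 2), ("arquivo", 3)] := by decide
  rw [h]
  simp [PySem.Dict.getD, PySem.Dict.get?]
  by_cases h1 : s = "metadata"; · subst h1; decide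
  by_cases h2 : s = "pagina2"; · subst h2; decide
  by_cases h3 : s = "pagina1"; · subst h3; decide
  by_cases h4 : s = "arquivo"; · subst h4; decide
  have b1 : (("metadata":String) == s) = false := beq_eq_false_iff_ne.mpr (fun hh => h1 hh.symm)
  have b2 : (("pagina2":String) == s) = false := beq_eq_false_iff_ne.mpr (fun hh => h2 hh.symm)
  have b3 : (("pagina1":String) == s) = false := beq_eq_false_iff_ne.mpr (fun hh => h3 hh.symm)
  have b4 : (("arquivo":String) == s) = false := beq_eq_false_iff_ne.mpr (fun hh => h4 hh.symm)
  simp [List.find?, b1, b2, b3, b4, h1, h2, h3, h4]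

lemma score_cases (s : String) :
    score s = 0 ∨ score s = 1 ∨ score s = 2 ∨ score s = 3 ∨ score s = 50 := by
  unfold score; split_ifs <;> simp

lemma score_le (s : String) : score s ≤ 50 := by
  rcases score_cases s with h|h|h|h|h <;> omega

lemma mval_cases (c : List (String × String)) :
    mval c = 0 ∨ mval c = 1 ∨ mval c = 2 ∨ mval c = 3 ∨ mval c = 50 ∨ mval c = 99 := by
  induction c with
  | nil => simp [mval]
  | cons p r ih => rcases score_cases p.1 with h|h|h|h|h <;> simp only [mval] <;> omega

lemma mval_le (c : List (String × String)) (h : c ≠ []) : mval c ≤ 50 := by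
  cases c with
  | nil => simp at h
  | cons p r => have := score_le p.1; simp only [mval]; omega

lemma foldl_enum (c : List (String × String)) : ∀ (i : Int) (st : Int × Int),
    (PySem.List.enumerate c i).foldl
      (fun (st : Int × Int) p =>
        let score := (PySem.Dict.ofList [("metadata", (0:Int)), ("pagina2", 1), ("pagina1", 2), ("arquivo", 3)]).getD p.2.1 50
        if score < st.2 then (p.1, score) else st) st = fA c i st := by
  induction c with
  | nil => intro i st; simp [PySem.List.enumerate_nil, fA]
  | cons p r ih =>
    intro i st
    rw [PySem.List.enumerate_cons, List.foldl_cons, ih]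
    simp only [fA, priority_getD]

lemma fA_spec (c : List (String × String)) : ∀ (i bi bs : Int),
    (mval c < bs → bs ≤ 99 → fA c i (bi, bs) = (i + fmi c, mval c)) ∧
    (bs ≤ mval c → fA c i (bi, bs) = (bi, bs)) := by
  induction c with
  | nil =>
    intro i bi bs
    exact ⟨fun h1 h2 => absurd h1 (by simp only [mval] at h1 ⊢; omega), fun _ => rfl⟩
  | cons p r ih =>
    intro i bi bs
    constructor
    · intro hlt hb
      simp only [fA]
      by_cases h1 : score p.1 < bs
      · rw [if_pos h1]
        by_cases h2 : score p.1 ≤ mval r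
        · rw [(ih (i+1) i (score p.1)).2 h2]
          simp only [mval, fmi] at *
          rw [if_pos h2, Prod.mk.injEq]; constructor <;> omega
        · rw [(ih (i+1) i (score p.1)).1 (by omega) (by have := score_le p.1; omega)]
          simp only [mval, fmi] at *
          rw [if_neg h2, Prod.mk.injEq]; constructor <;> omega
      · have h2 : ¬ score p.1 ≤ mval r := by simp only [mval] at hlt; omega
        rw [if_neg h1, (ih (i+1) bi bs).1 (by simp only [mval] at hlt ⊢; omega) hb]
        simp only [mval, fmi] at *
        rw [if_neg h2, Prod.mk.injEq]; constructor <;> omega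
    · intro hle
      simp only [mval] at hle
      simp only [fA]
      rw [if_neg (by omega), (ih (i+1) bi bs).2 (by omega)]

lemma findSrc_of_mval (name : String) (v : Int) (hv : ∀ s, score s = v ↔ s = name) :
    ∀ (c : List (String × String)) (i : Int), mval c = v → findSrc name i c = some (i + fmi c) := by
  intro c
  induction c with
  | nil => intro i h; simp [mval] at h; have := (hv name).2 rfl; rcases score_cases name with h'|h'|h'|h'|h' <;> omega
  | cons p r ih =>
    intro i h
    simp only [mval] at h
    by_cases hp : p.1 = name
    · have hs : score p.1 = v := (hv p.1).2 hp
      have h2 : score p.1 ≤ mval r := by omega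
      simp only [findSrc, if_pos hp, fmi, if_pos h2, add_zero]
    · have hs : score p.1 ≠ v := fun hh => hp ((hv p.1).1 hh)
      have hr : mval r = v := by omega
      have h2 : ¬ score p.1 ≤ mval r := by omega
      simp only [findSrc, if_neg hp, fmi, if_neg h2]
      rw [ih (i+1) hr]
      congr 1; omega

lemma findSrc_none (name : String) (v : Int) (hv : ∀ s, score s = v ↔ s = name) :
    ∀ (c : List (String × String)) (i : Int), v < mval c → findSrc name i c = none := by
  intro c
  induction c with
  | nil => intro i _; simp [findSrc]
  | cons p r ih =>
    intro i h
    simp only [mval] at h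
    have hp : p.1 ≠ name := by
      intro hh
      have : score p.1 = v := (hv p.1).2 hh
      omega
    simp only [findSrc, if_neg hp]
    exact ih (i+1) (by omega)

lemma fmi_of_big (c : List (String × String)) (h : 3 < mval c) : fmi c = 0 := by
  cases c with
  | nil => simp [fmi]
  | cons p r =>
    simp only [mval] at h
    have h1 := score_cases p.1
    have h2 := mval_cases r
    simp only [fmi]
    rw [if_pos (by omega)]

lemma hv_metadata : ∀ s, score s = 0 ↔ s = "metadata" := by
  intro s; unfold score; split_ifs <;> simp_all
lemma hv_pagina2 : ∀ s, score s = 1 ↔ s = "pagina2" := by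
  intro s; unfold score; split_ifs <;> simp_all
lemma hv_pagina1 : ∀ s, score s = 2 ↔ s = "pagina1" := by
  intro s; unfold score; split_ifs <;> simp_all
lemma hv_arquivo : ∀ s, score s = 3 ↔ s = "arquivo" := by
  intro s; unfold score; split_ifs <;> simp_all

lemma pickB_eq_fmi (c : List (String × String)) (h : c ≠ []) :
    pickByPriority c ["metadata", "pagina2", "pagina1", "arquivo"] = fmi c := by
  have hle := mval_le c h
  rcases mval_cases c with hm|hm|hm|hm|hm|hm
  · simp only [pickByPriority, findSrc_of_mval _ 0 hv_metadata c 0 hm]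
    omega
  · simp only [pickByPriority,
      findSrc_none _ 0 hv_metadata c 0 (by omega),
      findSrc_of_mval _ 1 hv_pagina2 c 0 hm]
    omega
  · simp only [pickByPriority,
      findSrc_none _ 0 hv_metadata c 0 (by omega),
      findSrc_none _ 1 hv_pagina2 c 0 (by omega),
      findSrc_of_mval _ 2 hv_pagina1 c 0 hm]
    omega
  · simp only [pickByPriority,
      findSrc_none _ 0 hv_metadata c 0 (by omega),
      findSrc_none _ 1 hv_pagina2 c 0 (by omega),
      findSrc_none _ 2 hv_pagina1 c 0 (by omega),
      findSrc_of_mval _ 3 hv_arquivo c 0 hm]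
    omega
  · simp only [pickByPriority,
      findSrc_none _ 0 hv_metadata c 0 (by omega),
      findSrc_none _ 1 hv_pagina2 c 0 (by omega),
      findSrc_none _ 2 hv_pagina1 c 0 (by omega),
      findSrc_none _ 3 hv_arquivo c 0 (by omega)]
    exact (fmi_of_big c (by omega)).symm
  · omega

-- ===== VERDICT (by name: the statement is the Claim_ definition above) =====
theorem pick_default_index_spec : Claim_equal_pick_default_index := by
  intro c _
  unfold Spec_pick_default_index pick_default_index pick_default_index_alt
  by_cases h : c = []
  · simp [h]
  · rw [if_neg h, if_neg h]
    have hle := mval_le c h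
    show some ((PySem.List.enumerate c 0).foldl
      (fun (st : Int × Int) p =>
        let score := (PySem.Dict.ofList [("metadata", (0:Int)), ("pagina2", 1), ("pagina1", 2), ("arquivo", 3)]).getD p.2.1 50
        if score < st.2 then (p.1, score) else st) (0, 99)).1
      = some (pickByPriority c ["metadata", "pagina2", "pagina1", "arquivo"])
    rw [foldl_enum, (fA_spec c 0 0 99).1 (by omega) (by omega), pickB_eq_fmi c h]
    simp
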